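-- pv_equiv track=rewrite | github.com/JonghyunLEE12/SWEA | 프로그래머스/unrated/181855. 문자열 묶기/문자열 묶기.py | solution
-- ===== SOURCE A (Python) =====
-- def solution(strArr):
--     answer = 0
--
--     dp = [0]*len(strArr)
--
--     for i in range(len(strArr)):
--         dp[i] = len(strArr[i])
--
--
--     countDict = {}
--     for num in dp:
--         countDict[num] = 0
--
--     for num in dp:
--         countDict[num] += 1
--
--     answer = max(countDict.values())
--     return answer
-- ===== SOURCE B (Python) =====
-- def solution(strArr):
--     # sort the lengths, then scan runs of equal values; the longest run is the answer
--     lens = sorted(len(s) for s in strArr)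
--     best = 0
--     run = 0
--     prev = None
--     for x in lens:
--         if prev is not None and x == prev:
--             run += 1
--         else:
--             run = 1
--             prev = x
--         if run > best:
--             best = run
--     return best
-- ===== Notes on version B (the rewrite author's own statement) =====
-- stated objective: alternative
-- what changed: Replaces A's dict-counting passes (zero-init loop plus increment loop plus max over values) with sorting the lengths and a single run-length scan over the sorted sequence.
import Mathlib
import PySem

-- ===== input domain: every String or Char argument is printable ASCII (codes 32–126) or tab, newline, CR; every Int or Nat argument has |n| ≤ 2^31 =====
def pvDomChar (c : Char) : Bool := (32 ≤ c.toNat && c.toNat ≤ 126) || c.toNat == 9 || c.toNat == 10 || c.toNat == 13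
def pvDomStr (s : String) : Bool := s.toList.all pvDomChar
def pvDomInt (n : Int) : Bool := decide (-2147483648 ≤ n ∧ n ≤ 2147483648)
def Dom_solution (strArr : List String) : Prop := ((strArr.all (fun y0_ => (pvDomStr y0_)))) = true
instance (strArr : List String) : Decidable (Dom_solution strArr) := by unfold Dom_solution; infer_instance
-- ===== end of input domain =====

-- B replaces A's dict-counting passes by sorting the lengths and scanning runs; equal values on all
-- nonempty inputs (on [] A raises ValueError, see Raises_solution).

-- ===== PORT A =====
def solution (strArr : List String) : Int :=
  -- dp = [0]*len(strArr); for i in range(len(strArr)): dp[i] = len(strArr[i])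
  -- (strArr[i] ported with pyGetD: i is always in range here)
  let dp := (PySem.List.pyRange 0 strArr.length 1).foldl
      (fun dp i => dp.set i.toNat (PySem.Str.len (PySem.List.pyGetD strArr i ""))) (List.replicate strArr.length 0)
  -- countDict = {}; for num in dp: countDict[num] = 0
  let d1 := dp.foldl (fun d num => d.insert num 0) (PySem.Dict.empty (κ := Int) (ν := Int))
  -- for num in dp: countDict[num] += 1  (modify with default 0 is exact: every key was inserted above)
  let d2 := dp.foldl (fun d num => d.modify num 0 (· + 1)) d1
  -- max(countDict.values()); none only for strArr = [], which Pre_solution excludes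
  (PySem.List.max? d2.values (fun v => v)).getD 0

-- ===== PORT B =====
-- one scan step: extend the current run or start a new one, keep the best run length
def scanStep (st : Int × Int × Option Int) (x : Int) : Int × Int × Option Int :=
  let best := st.1
  let run := st.2.1
  let prev := st.2.2
  let (run, prev) := if prev = some x then (run + 1, prev) else ((1 : Int), some x)
  (if run > best then run else best, run, prev)

def solution_alt (strArr : List String) : Int :=
  let lens := PySem.List.sorted (strArr.map PySem.Str.len) (fun x => x) false
  (lens.foldl scanStep (0, 0, none)).1

-- ===== PRECONDITION & SPEC =====
-- Pre_ excludes only the empty list, on which A raises ValueError (max() of an empty sequence).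
def Pre_solution (strArr : List String) : Prop := strArr ≠ []
instance (strArr : List String) : Decidable (Pre_solution strArr) := by unfold Pre_solution; infer_instance
def pvWitness_solution : List String := (["a", "bb", "c"])

def Spec_solution (strArr : List String) (out : Int) : Prop := out = solution_alt strArr
instance (strArr : List String) (out : Int) : Decidable (Spec_solution strArr out) := by unfold Spec_solution; infer_instance

-- ===== CLAIM (what is proved, stated in full; the proofs are below) =====
def Claim_equal_solution : Prop := ∀ (strArr : List String), Dom_solution strArr → Pre_solution strArr → Spec_solution strArr (solution strArr)

-- ===== LEMMAS AND PROOFS =====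

-- the common value both programs compute: the largest multiplicity in l
def cmax (l : List Int) : Int :=
  ((PySem.Set.ofList l).map (fun v => (l.count v : Int))).foldl max 0

-- shifting the accumulator of a running max
theorem foldl_max_shift (l : List Int) : ∀ (a b : Int), l.foldl max (max a b) = max a (l.foldl max b) := by
  induction l with
  | nil => intro a b; rfl
  | cons x t ih =>
    intro a b
    simp only [List.foldl_cons, max_assoc]
    exact ih a (max b x)

theorem cmax_nonneg (l : List Int) : 0 ≤ cmax l := by
  have := (PySem.List.le_foldl_max ((PySem.Set.ofList l).map (fun v => (l.count v : Int))) 0).1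
  simpa [cmax] using this

theorem ofList_perm (l l' : List Int) (h : l.Perm l') :
    (PySem.Set.ofList l).Perm (PySem.Set.ofList l') := by
  refine (List.perm_ext_iff_of_nodup (PySem.Set.nodup_ofList l) (PySem.Set.nodup_ofList l')).mpr ?_
  intro x
  rw [PySem.Set.mem_ofList, PySem.Set.mem_ofList]
  exact ⟨fun hx => h.mem_iff.mp hx, fun hx => h.mem_iff.mpr hx⟩

-- cmax only depends on the multiset of elements
theorem cmax_perm (l l' : List Int) (h : l.Perm l') : cmax l = cmax l' := by
  unfold cmax
  have h1 : (PySem.Set.ofList l).map (fun v => (l.count v : Int))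
      = (PySem.Set.ofList l).map (fun v => (l'.count v : Int)) := by
    refine List.map_congr_left (fun x _ => ?_)
    rw [h.count_eq]
  rw [h1]
  exact ((ofList_perm l l' h).map _).foldl_eq 0

-- === A-side characterisation ===

theorem dp_eq_map_aux (xs : List String) (n : Nat) (hn : n ≤ xs.length) :
    (PySem.List.pyRange 0 n 1).foldl
      (fun dp i => dp.set i.toNat (PySem.Str.len (PySem.List.pyGetD xs i ""))) (List.replicate xs.length 0)
    = (xs.take n).map PySem.Str.len ++ List.replicate (xs.length - n) 0 := by
  induction n with
  | zero => simp [PySem.List.pyRange]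
  | succ n ih =>
    have hn' : n ≤ xs.length := by omega
    have hcast : ((n + 1 : Nat) : Int) = (n : Int) + 1 := by push_cast; ring
    rw [hcast, PySem.List.pyRange_one_succ_right (by positivity), List.foldl_append, ih hn',
      List.foldl_cons, List.foldl_nil]
    have hidx : PySem.List.pyGetD xs (n : Int) "" = xs.getD n "" := PySem.List.pyGetD_natCast xs n ""
    have hlen : ((xs.take n).map PySem.Str.len).length = n := by
      simp [List.length_take, Nat.min_eq_left hn']
    rw [Int.toNat_natCast, hidx, List.set_append]
    simp only [hlen, Nat.lt_irrefl, Nat.sub_self]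
    obtain ⟨m, hm⟩ : ∃ m, xs.length - n = m + 1 := ⟨xs.length - (n + 1), by omega⟩
    rw [hm, List.replicate_succ, List.set_cons_zero]
    have hlt : n < xs.length := by omega
    have hml : xs.length - (n + 1) = m := by omega
    rw [hml]
    have htake2 : List.take (n + 1) (List.map PySem.Str.len xs)
        = List.take n (List.map PySem.Str.len xs) ++ [PySem.Str.len (xs.getD n "")] := by
      rw [List.take_add_one]
      simp [hlt, List.getD]
    simp [htake2]

theorem dp_eq_map (strArr : List String) :
    (PySem.List.pyRange 0 strArr.length 1).foldl
      (fun dp i => dp.set i.toNat (PySem.Str.len (PySem.List.pyGetD strArr i ""))) (List.replicate strArr.length 0)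
    = strArr.map PySem.Str.len := by
  have := dp_eq_map_aux strArr strArr.length le_rfl
  simpa using this

theorem getD_foldl_insert_zero (l : List Int) : ∀ (d : PySem.Dict Int Int) (v : Int), d.getD v 0 = 0 →
    (l.foldl (fun d num => d.insert num 0) d).getD v 0 = 0 := by
  induction l with
  | nil => intro d v h; simpa using h
  | cons x t ih =>
    intro d v h
    refine ih _ v ?_
    rw [PySem.Dict.getD_insert]
    split <;> simp [h]

theorem set_update_of_subset (l : List Int) : ∀ (S : PySem.Set Int), (∀ x ∈ l, x ∈ S) →
    PySem.Set.update S l = S := by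
  induction l with
  | nil => intro S _; rfl
  | cons x t ih =>
    intro S h
    have hx : PySem.Set.add S x = S := by
      have hxm : x ∈ S := h x List.mem_cons_self
      have hc : S.contains x = true := by simpa using hxm
      simp [PySem.Set.add, hxm]
    show PySem.Set.update (PySem.Set.add S x) t = S
    rw [hx]
    exact ih S (fun y hy => h y (by simp [hy]))

theorem solution_eq_cmax (strArr : List String) (h : strArr ≠ []) :
    solution strArr = cmax (strArr.map PySem.Str.len) := by
  unfold solution
  simp only [dp_eq_map]
  set dp := strArr.map PySem.Str.len with hdp
  set d1 := dp.foldl (fun d num => d.insert num 0) (PySem.Dict.empty (κ := Int) (ν := Int)) with hd1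
  set d2 := dp.foldl (fun d num => d.modify num 0 (· + 1)) d1 with hd2
  -- keys of d1 and d2
  have hk1 : d1.keys = PySem.Set.ofList dp := by
    rw [hd1, PySem.Dict.keys_foldl_insert dp (fun _ _ => (0 : Int)), PySem.Dict.keys_empty,
      PySem.Set.update_nil_left]
  have hk2 : d2.keys = PySem.Set.ofList dp := by
    rw [hd2, PySem.Dict.keys_foldl_modify dp 0 (fun _ _ v => v + 1), hk1]
    exact set_update_of_subset dp _ (fun x hx => (PySem.Set.mem_ofList dp x).mpr hx)
  have hnd : d2.keys.Nodup := by rw [hk2]; exact PySem.Set.nodup_ofList dp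
  -- value at each key
  have hval : ∀ v : Int, d2.getD v 0 = (dp.count v : Int) := by
    intro v
    rw [hd2, PySem.Dict.getD_foldl_modify_add_one dp d1 v,
      getD_foldl_insert_zero dp _ v (by simp [PySem.Dict.getD_empty])]
    ring
  have hvals : d2.values = (PySem.Set.ofList dp).map (fun v => (dp.count v : Int)) := by
    rw [PySem.Dict.values_eq_map_keys d2 hnd 0, hk2]
    exact List.map_congr_left (fun x _ => hval x)
  rw [hvals]
  -- both sides are the running max over the (nonempty) list of counts
  obtain ⟨k0, S, hS⟩ : ∃ k0 S, PySem.Set.ofList dp = k0 :: S := by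
    cases hh : PySem.Set.ofList dp with
    | nil =>
      exfalso
      cases strArr with
      | nil => exact h rfl
      | cons a t =>
        have : PySem.Str.len a ∈ PySem.Set.ofList dp := by
          rw [PySem.Set.mem_ofList]; simp [hdp]
        rw [hh] at this; simp at this
    | cons k0 S => exact ⟨k0, S, rfl⟩
  rw [hS, List.map_cons, PySem.List.max?_id_cons, Option.getD_some]
  unfold cmax
  rw [hS, List.map_cons, List.foldl_cons]
  have : max 0 ((dp.count k0 : Nat) : Int) = ((dp.count k0 : Nat) : Int) :=
    max_eq_right (Int.natCast_nonneg _)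
  rw [this]

-- === B-side characterisation ===

theorem scan_replicate (k : Nat) : ∀ (best run v : Int), run ≤ best →
    (List.replicate k v).foldl scanStep (best, run, some v) = (max best (run + k), run + k, some v) := by
  induction k with
  | zero => intro best run v h; simp [max_eq_left h]
  | succ k ih =>
    intro best run v h
    have step : scanStep (best, run, some v) v = (max best (run + 1), run + 1, some v) := by
      simp [scanStep, max_def]; split <;> split <;> omega
    rw [List.replicate_succ, List.foldl_cons, step, ih _ _ _ (le_max_right _ _)]
    have h2 : max (max best (run + 1)) (run + 1 + k) = max best (run + (k + 1)) := by
      rw [max_assoc]; congr 1; rw [max_eq_right (by omega)]; ring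
    rw [h2]
    congr 2
    push_cast
    ring

theorem scan_run (k : Nat) (hk : 1 ≤ k) (best run v : Int) (prev : Option Int) (hb : 0 ≤ best)
    (hp : prev ≠ some v) :
    (List.replicate k v).foldl scanStep (best, run, prev) = (max best (k : Int), (k : Int), some v) := by
  obtain ⟨k', rfl⟩ : ∃ k', k = k' + 1 := ⟨k - 1, by omega⟩
  clear hk
  have step : scanStep (best, run, prev) v = (max best 1, 1, some v) := by
    simp [scanStep, hp, max_def]; split <;> split <;> omega
  rw [List.replicate_succ, List.foldl_cons, step, scan_replicate _ _ _ _ (le_max_right _ _)]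
  have h1 : max (max best 1) (1 + (k' : Int)) = max best ((k' + 1 : Nat) : Int) := by
    rw [max_assoc]; congr 1; rw [max_eq_right (by omega)]; push_cast; ring
  have h2 : (1 : Int) + (k' : Int) = ((k' + 1 : Nat) : Int) := by push_cast; ring
  rw [h1, h2]

-- a sorted list splits into a first run and a strictly larger sorted remainder
theorem sorted_cons_split (rest : List Int) : ∀ (v : Int), (v :: rest).Pairwise (· ≤ ·) →
    ∃ t : List Int, v :: rest = List.replicate ((v :: rest).count v) v ++ t ∧
      (∀ x ∈ t, v < x) ∧ t.Pairwise (· ≤ ·) ∧ t.length ≤ rest.length := by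
  induction rest with
  | nil =>
    intro v _
    exact ⟨[], by simp, by simp, List.Pairwise.nil, by simp⟩
  | cons w rest' ih =>
    intro v hs
    rw [List.pairwise_cons] at hs
    obtain ⟨hvall, htail⟩ := hs
    rw [List.pairwise_cons] at htail
    obtain ⟨hwall, hrest'⟩ := htail
    by_cases hw : w = v
    · subst hw
      have hs' : (w :: rest').Pairwise (· ≤ ·) := by
        rw [List.pairwise_cons]
        exact ⟨hwall, hrest'⟩
      obtain ⟨t, heq, hlt, hpw, hlen⟩ := ih w hs'
      refine ⟨t, ?_, hlt, hpw, by simpa using Nat.le_succ_of_le hlen⟩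
      have hc : (w :: w :: rest').count w = (w :: rest').count w + 1 := by
        simp
      rw [hc, List.replicate_succ, List.cons_append]
      exact congrArg (w :: ·) heq
    · have hlt : ∀ x ∈ w :: rest', v < x := by
        intro x hx
        rcases List.mem_cons.mp hx with rfl | hx'
        · exact lt_of_le_of_ne (hvall x hx) (Ne.symm hw)
        · have hvx : v ≤ x := hvall x (by simp [hx'])
          rcases lt_or_eq_of_le hvx with hlt' | heq'
          · exact hlt'
          · exact absurd (le_antisymm (heq' ▸ hwall x hx') (hvall w (by simp))) hw
      have hnot : v ∉ w :: rest' := fun hv => lt_irrefl v (hlt v hv)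
      have hc : (v :: w :: rest').count v = 1 := by
        rw [List.count_cons_self, List.count_eq_zero_of_not_mem hnot]
      refine ⟨w :: rest', by rw [hc]; simp, hlt, ?_, le_rfl⟩
      rw [List.pairwise_cons]
      exact ⟨hwall, hrest'⟩

theorem cmax_run (k : Nat) (hk : 1 ≤ k) (v : Int) (t : List Int) (hv : v ∉ t) :
    cmax (List.replicate k v ++ t) = max (k : Int) (cmax t) := by
  set s := List.replicate k v ++ t with hsdef
  have hk0 : ¬ k = 0 := by omega
  have hmem : ∀ x, x ∈ s ↔ x = v ∨ x ∈ t := by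
    intro x
    simp only [hsdef, List.mem_append, List.mem_replicate]
    tauto
  have hperm : (PySem.Set.ofList s).Perm (v :: PySem.Set.ofList t) := by
    refine (List.perm_ext_iff_of_nodup (PySem.Set.nodup_ofList s) ?_).mpr ?_
    · exact List.nodup_cons.mpr ⟨fun hv' => hv ((PySem.Set.mem_ofList t v).mp hv'), PySem.Set.nodup_ofList t⟩
    · intro x
      rw [PySem.Set.mem_ofList, hmem, List.mem_cons, PySem.Set.mem_ofList]
  have hcount_v : (s.count v : Int) = (k : Int) := by
    rw [hsdef, List.count_append, List.count_replicate, if_pos (by simp),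
      List.count_eq_zero_of_not_mem hv]
    simp
  have hcount_t : ∀ x ∈ PySem.Set.ofList t, (s.count x : Int) = (t.count x : Int) := by
    intro x hx
    have hxv : x ≠ v := fun h => hv (h ▸ (PySem.Set.mem_ofList t x).mp hx)
    have hne : ¬ ((v == x) = true) := by
      simp only [beq_iff_eq]
      exact fun hh => hxv hh.symm
    rw [hsdef, List.count_append, List.count_replicate, if_neg hne]
    simp
  unfold cmax
  rw [(hperm.map (fun w => (s.count w : Int))).foldl_eq 0, List.map_cons, List.foldl_cons,
    hcount_v, List.map_congr_left hcount_t,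
    max_eq_right (Int.natCast_nonneg k),
    show ((k : Nat) : Int) = max (k : Int) 0 from (max_eq_left (Int.natCast_nonneg k)).symm,
    foldl_max_shift, max_eq_left (Int.natCast_nonneg k)]

theorem scan_sorted (n : Nat) : ∀ (s : List Int), s.length ≤ n → s.Pairwise (· ≤ ·) →
    ∀ (best run : Int) (prev : Option Int), 0 ≤ best →
      (∀ p, prev = some p → ∀ x ∈ s, p < x) →
      (s.foldl scanStep (best, run, prev)).1 = max best (cmax s) := by
  induction n with
  | zero =>
    intro s hlen _ best run prev hb _
    have : s = [] := List.eq_nil_of_length_eq_zero (Nat.le_zero.mp hlen)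
    subst this
    simp [cmax, max_eq_left hb]
  | succ n ih =>
    intro s hlen hs best run prev hb hfresh
    cases s with
    | nil => simp [cmax, max_eq_left hb]
    | cons v rest =>
      obtain ⟨t, heq, htlt, htpw, htlen⟩ := sorted_cons_split rest v hs
      set k := (v :: rest).count v with hkdef
      have hk1 : 1 ≤ k := List.count_pos_iff.mpr (by simp)
      have hprev : prev ≠ some v := by
        intro hpe
        exact lt_irrefl v (hfresh v hpe v (by simp))
      rw [heq, List.foldl_append, scan_run k hk1 best run v prev hb hprev]
      have hrl : rest.length ≤ n := by simpa using hlen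
      have hlen' : t.length ≤ n := le_trans htlen hrl
      rw [ih t hlen' htpw (max best k) k (some v) (le_trans hb (le_max_left _ _))
        (fun p hp x hx => by injection hp with h'; exact h' ▸ htlt x hx)]
      have hvt : v ∉ t := fun hv => lt_irrefl v (htlt v hv)
      rw [cmax_run k hk1 v t hvt, max_assoc]

theorem solution_alt_eq_cmax (strArr : List String) :
    solution_alt strArr = cmax (strArr.map PySem.Str.len) := by
  unfold solution_alt
  set lens := PySem.List.sorted (strArr.map PySem.Str.len) (fun x => x) false with hlens
  have hpw : lens.Pairwise (· ≤ ·) := by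
    have := PySem.List.sorted_pairwise (strArr.map PySem.Str.len) (fun x => x)
    simpa [hlens] using this
  rw [scan_sorted lens.length lens le_rfl hpw 0 0 none le_rfl (fun p hp => by cases hp),
    max_eq_right (cmax_nonneg lens)]
  exact cmax_perm _ _ (PySem.List.sorted_perm (strArr.map PySem.Str.len) (fun x => x) false)

-- ===== VERDICT (by name: the statement is the Claim_ definition above) =====
theorem solution_spec : Claim_equal_solution := by
  intro strArr _ hpre
  unfold Spec_solution
  rw [solution_eq_cmax strArr hpre, solution_alt_eq_cmax strArr]
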